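-- pv_equiv track=rewrite | github.com/KnowledgeBI/wood | contact_custom/models/res_partner.py | check_special_char
-- ===== SOURCE A (Python) =====
-- def check_special_char(string):
--     accepted_char = '1234567890'
--     has_special_char = False
--     for char in string:
--         if char not in accepted_char:
--             has_special_char = True
--             break
--     return has_special_char
-- ===== SOURCE B (Python) =====
-- def check_special_char(string):
--     return bool(set(string) - set('1234567890'))
-- ===== Notes on version B (the rewrite author's own statement) =====
-- stated objective: simpler
-- what changed: Replaces the explicit scan-with-break flag loop by building the set of distinct characters and testing whether its difference with the digit set is nonempty (one-liner, no loop or mutable flag).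
import Mathlib
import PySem

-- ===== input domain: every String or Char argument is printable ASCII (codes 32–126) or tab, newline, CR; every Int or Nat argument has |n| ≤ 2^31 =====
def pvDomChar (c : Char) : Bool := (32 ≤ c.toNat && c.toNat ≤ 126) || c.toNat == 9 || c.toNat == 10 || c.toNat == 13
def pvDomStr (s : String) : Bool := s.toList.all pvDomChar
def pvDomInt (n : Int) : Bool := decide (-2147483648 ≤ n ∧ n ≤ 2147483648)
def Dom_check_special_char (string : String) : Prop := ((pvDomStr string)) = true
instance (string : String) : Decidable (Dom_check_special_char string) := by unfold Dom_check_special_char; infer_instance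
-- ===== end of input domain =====

-- ===== PORT A =====
-- B (see Source B) replaces A's flag loop by a set-difference test; objective: simpler.
def checkLoop (accepted : List Char) : List Char → Bool
  | [] => false
  | c :: rest => if !(accepted.contains c) then true else checkLoop accepted rest

def check_special_char (string : String) : Bool :=
  checkLoop "1234567890".toList string.toList

-- ===== PORT B =====
def check_special_char_alt (string : String) : Bool :=
  !(PySem.Set.diff (PySem.Set.ofList string.toList) (PySem.Set.ofList "1234567890".toList)).isEmpty

-- ===== PRECONDITION & SPEC =====
def Spec_check_special_char (string : String) (out : Bool) : Prop := out = check_special_char_alt string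
instance (string : String) (out : Bool) : Decidable (Spec_check_special_char string out) := by unfold Spec_check_special_char; infer_instance

-- ===== CLAIM (what is proved, stated in full; the proofs are below) =====
def Claim_equal_check_special_char : Prop := ∀ (string : String), Dom_check_special_char string → Spec_check_special_char string (check_special_char string)

-- ===== LEMMAS AND PROOFS =====

-- ===== VERDICT (by name: the statement is the Claim_ definition above) =====
lemma checkLoop_eq_any (acc : List Char) (l : List Char) :
    checkLoop acc l = l.any (fun c => !acc.contains c) := by
  induction l with
  | nil => rfl
  | cons c rest ih =>
    simp only [checkLoop, List.any_cons]
    by_cases h : acc.contains c <;> simp [ih]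

lemma ofList_digits :
    PySem.Set.ofList "1234567890".toList = "1234567890".toList := by decide

lemma contains_digit_bridge (c : Char) :
    (PySem.Set.contains (PySem.Set.ofList "1234567890".toList) c)
      = "1234567890".toList.contains c := by
  rw [ofList_digits]; rfl

lemma alt_eq_any (s : String) :
    check_special_char_alt s = s.toList.any (fun c => !("1234567890".toList.contains c)) := by
  unfold check_special_char_alt
  rw [Bool.eq_iff_iff]
  simp only [Bool.not_eq_eq_eq_not, Bool.not_true, List.isEmpty_eq_false_iff, List.any_eq_true]
  constructor
  · intro h
    rcases List.exists_mem_of_ne_nil _ h with ⟨c, hc⟩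
    have hc' := hc
    simp only [PySem.Set.diff, List.mem_filter, contains_digit_bridge] at hc'
    exact ⟨c, (PySem.Set.mem_ofList _ _).1 hc'.1, by simpa using hc'.2⟩
  · rintro ⟨c, hc, hnd⟩
    rw [← List.isEmpty_eq_false_iff, Bool.eq_false_iff]
    intro hemp
    have : c ∈ PySem.Set.diff (PySem.Set.ofList s.toList) (PySem.Set.ofList "1234567890".toList) := by
      simp only [PySem.Set.diff, List.mem_filter, contains_digit_bridge]
      exact ⟨(PySem.Set.mem_ofList _ _).2 hc, by simpa using hnd⟩
    rw [List.isEmpty_iff.1 hemp] at this; exact absurd this (List.not_mem_nil)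

theorem check_special_char_spec : Claim_equal_check_special_char := by
  intro s _
  unfold Spec_check_special_char check_special_char
  rw [checkLoop_eq_any, alt_eq_any]
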